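-- pv_equiv track=rewrite | github.com/shasankp000/Lexis | compression/pipeline/stage5_encode.py | _sequence_with_markers
-- ===== SOURCE A (Python) =====
-- from typing import Dict, List, Tuple, TypedDict
--
-- def _sequence_with_markers(words: List[str]) -> List[str]:
--     sequence: List[str] = []
--     for idx, word in enumerate(words):
--         sequence.append("^")
--         sequence.extend(list(word))
--         sequence.append("$")
--         if idx < len(words) - 1:
--             sequence.append("_")
--     return sequence
-- ===== SOURCE B (Python) =====
-- def _sequence_with_markers(words):
--     # Build the sequence back-to-front: walk the words in reverse, emit each
--     # piece reversed ($ word^), separate when output already exists, reverse once.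
--     out = []
--     for word in reversed(words):
--         if out:
--             out.append("_")
--         out.append("$")
--         out.extend(reversed(word))
--         out.append("^")
--     out.reverse()
--     return out
-- ===== Notes on version B (the rewrite author's own statement) =====
-- stated objective: alternative
-- what changed: Builds the output back-to-front: iterates the words in reverse, emits each piece in reversed character order, decides the '_' separator by whether output already exists instead of an idx < len-1 index test, and reverses the accumulator once at the end.
import Mathlib
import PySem

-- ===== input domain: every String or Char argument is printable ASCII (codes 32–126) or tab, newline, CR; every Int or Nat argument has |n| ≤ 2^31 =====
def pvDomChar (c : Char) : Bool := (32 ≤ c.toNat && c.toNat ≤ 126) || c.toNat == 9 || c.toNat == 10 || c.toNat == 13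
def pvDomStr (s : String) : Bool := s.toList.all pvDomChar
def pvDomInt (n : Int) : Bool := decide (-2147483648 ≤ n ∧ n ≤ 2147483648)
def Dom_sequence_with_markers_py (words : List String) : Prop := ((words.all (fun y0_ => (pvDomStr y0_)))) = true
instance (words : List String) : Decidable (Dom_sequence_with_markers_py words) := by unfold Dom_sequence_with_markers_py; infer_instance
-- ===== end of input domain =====

-- B builds the output back-to-front over reversed(words), separating on non-empty output, then reverses once; A loops forward with an index and an idx<len-1 check. Return values only; equal on all inputs.

-- ===== PORT A =====
-- the for-loop of A: index idx, remaining words ws, accumulator seq; n = len(words)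
def pvSeqLoop (n : Nat) (idx : Nat) (ws : List String) (seq : List String) : List String :=
  match ws with
  | [] => seq
  | w :: rest =>
      pvSeqLoop n (idx + 1) rest
        (seq ++ ["^"] ++ w.toList.map (fun c => String.ofList [c]) ++ ["$"]
             ++ (if idx < n - 1 then ["_"] else []))

def sequence_with_markers_py (words : List String) : List String :=
  pvSeqLoop words.length 0 words []

-- ===== PORT B =====
-- Source B's loop body: separator if out non-empty, then "$", reversed chars of word, "^"
def pvRevStep (out : List String) (w : String) : List String :=
  (if out ≠ [] then out ++ ["_"] else out) ++ ["$"]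
    ++ w.toList.reverse.map (fun c => String.ofList [c]) ++ ["^"]

def sequence_with_markers_py_alt (words : List String) : List String :=
  (words.reverse.foldl pvRevStep []).reverse

-- ===== PRECONDITION & SPEC =====
def Spec_sequence_with_markers_py (words : List String) (out : List String) : Prop := out = sequence_with_markers_py_alt words
instance (words : List String) (out : List String) : Decidable (Spec_sequence_with_markers_py words out) := by unfold Spec_sequence_with_markers_py; infer_instance

-- ===== CLAIM (what is proved, stated in full; the proofs are below) =====
def Claim_equal_sequence_with_markers_py : Prop := ∀ (words : List String), Dom_sequence_with_markers_py words → Spec_sequence_with_markers_py words (sequence_with_markers_py words)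

-- ===== LEMMAS AND PROOFS =====

-- proof-only canonical form: '^'-piece per word, '_' between consecutive words
def pvPiece (w : String) : List String :=
  "^" :: w.toList.map (fun c => String.ofList [c]) ++ ["$"]

def pvCanon : List String → List String
  | [] => []
  | [w] => pvPiece w
  | w :: rest@(_ :: _) => pvPiece w ++ ["_"] ++ pvCanon rest

theorem pvCanon_eq_nil_iff (m : List String) : pvCanon m = [] ↔ m = [] := by
  cases m with
  | nil => simp [pvCanon]
  | cons w rest => cases rest <;> simp [pvCanon, pvPiece]

theorem pvRevStep_canon (m : List String) (w : String) :
    pvRevStep (pvCanon m).reverse w = (pvCanon (w :: m)).reverse := by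
  cases m with
  | nil => simp [pvRevStep, pvCanon, pvPiece]
  | cons r rs =>
    have h : pvCanon (r :: rs) ≠ [] := by simp [pvCanon_eq_nil_iff]
    simp [pvRevStep, h, pvCanon, pvPiece]

theorem pvFoldl_canon (l : List String) : ∀ (m : List String),
    l.foldl pvRevStep (pvCanon m).reverse = (pvCanon (l.reverse ++ m)).reverse := by
  induction l with
  | nil => intro m; simp
  | cons w rest ih =>
    intro m
    rw [List.foldl_cons, pvRevStep_canon, ih (w :: m)]
    simp

theorem alt_eq_canon (words : List String) :
    sequence_with_markers_py_alt words = pvCanon words := by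
  rw [sequence_with_markers_py_alt]
  have h0 : ([] : List String) = (pvCanon []).reverse := by simp [pvCanon]
  rw [h0, pvFoldl_canon words.reverse []]
  simp

theorem pvSeqLoop_eq_canon (ws : List String) : ∀ (n idx : Nat) (seq : List String),
    idx + ws.length = n →
    pvSeqLoop n idx ws seq = seq ++ pvCanon ws := by
  induction ws with
  | nil => intro n idx seq _; simp [pvSeqLoop, pvCanon]
  | cons w rest ih =>
    intro n idx seq h
    cases rest with
    | nil =>
      have hidx : ¬ idx < n - 1 := by simp at h; omega
      simp [pvSeqLoop, hidx, pvCanon, pvPiece]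
    | cons r rs =>
      have hidx : idx < n - 1 := by simp at h; omega
      rw [pvSeqLoop, ih n (idx + 1) _ (by simp at h ⊢; omega)]
      simp [hidx, pvCanon, pvPiece]

-- ===== VERDICT (by name: the statement is the Claim_ definition above) =====
theorem sequence_with_markers_py_spec : Claim_equal_sequence_with_markers_py := by
  intro words _
  show _ = _
  rw [sequence_with_markers_py, pvSeqLoop_eq_canon words words.length 0 [] (by simp),
      alt_eq_canon]
  simp
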